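-- pv_equiv track=rewrite | github.com/dodoyeon/modooeu-algortihm | modooeu_1.py | dongmung
-- ===== SOURCE A (Python) =====
-- def dongmung(l):
--     n = len(l)
--     res = []
--     for i in range(n): # n-1이 낫다!
--         for j in range(i+1, n):
--             if l[i]==l[j]:
--                 res.append(l[i])
--     return res
-- ===== SOURCE B (Python) =====
-- def dongmung(l):
--     # Suffix-frequency approach: walk the list right-to-left keeping a count of
--     # each value seen so far; position i contributes (count of equal later
--     # elements) copies of l[i]. O(n + output) instead of O(n^2).
--     cnt = {}
--     pieces = []
--     for x in reversed(l):
--         pieces.append([x] * cnt.get(x, 0))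
--         cnt[x] = cnt.get(x, 0) + 1
--     res = []
--     for p in reversed(pieces):
--         res += p
--     return res
-- ===== Notes on version B (the rewrite author's own statement) =====
-- stated objective: faster
-- what changed: Replaced the O(n^2) nested index loops (compare every pair i<j) by a single right-to-left pass that keeps a suffix-frequency dictionary and emits, for each position, count-of-equal-later-elements copies of its value.
import Mathlib
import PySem

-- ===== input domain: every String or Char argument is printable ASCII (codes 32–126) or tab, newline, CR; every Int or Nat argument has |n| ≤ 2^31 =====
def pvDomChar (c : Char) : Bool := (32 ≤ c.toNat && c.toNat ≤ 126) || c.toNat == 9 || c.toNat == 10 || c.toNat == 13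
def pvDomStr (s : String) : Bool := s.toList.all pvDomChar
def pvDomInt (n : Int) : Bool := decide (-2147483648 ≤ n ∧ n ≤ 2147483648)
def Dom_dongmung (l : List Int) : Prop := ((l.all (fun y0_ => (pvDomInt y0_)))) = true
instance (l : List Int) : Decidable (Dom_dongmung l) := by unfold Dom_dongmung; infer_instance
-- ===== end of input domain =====

-- B replaces A's double index loop by a single right-to-left pass keeping a suffix
-- frequency dictionary; same return value, proved equal below.

-- ===== PORT A =====
def dongmung (l : List Int) : List Int :=
  let n : Int := PySem.List.len l
  (PySem.List.pyRange 0 n 1).foldl (fun res i =>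
    (PySem.List.pyRange (i + 1) n 1).foldl (fun res j =>
      if PySem.List.pyGetD l i 0 == PySem.List.pyGetD l j 0 then
        res ++ [PySem.List.pyGetD l i 0]
      else res) res) []

-- ===== PORT B =====
def dongmung_alt (l : List Int) : List Int :=
  let st := l.reverse.foldl
    (fun (st : PySem.Dict Int Int × List (List Int)) x =>
      let c := st.1.getD x 0
      (st.1.insert x (c + 1), st.2 ++ [List.replicate c.toNat x]))
    (PySem.Dict.empty, [])
  st.2.reverse.foldl (fun res p => res ++ p) []

-- ===== PRECONDITION & SPEC =====
def Spec_dongmung (l : List Int) (out : List Int) : Prop := out = dongmung_alt l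
instance (l : List Int) (out : List Int) : Decidable (Spec_dongmung l out) := by unfold Spec_dongmung; infer_instance

-- ===== CLAIM (what is proved, stated in full; the proofs are below) =====
def Claim_equal_dongmung : Prop := ∀ (l : List Int), Dom_dongmung l → Spec_dongmung l (dongmung l)

-- ===== LEMMAS AND PROOFS =====

/-- Common characterisation: position i contributes one copy of l[i] per later equal element. -/
def pairRep : List Int → List Int
  | [] => []
  | x :: xs => List.replicate (xs.count x) x ++ pairRep xs

-- ---- A = pairRep ----

lemma filter_map_const_eq_replicate (x : Int) (xs : List Int) :
    (xs.filter (fun y => x == y)).map (fun _ => x) = List.replicate (xs.count x) x := by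
  induction xs with
  | nil => simp
  | cons y ys ih =>
    by_cases h : x = y
    · subst h
      simp [List.filter_cons, List.count_cons, List.replicate_succ, ih]
    · simp [List.filter_cons, List.count_cons, h, Ne.symm h, ih]

lemma inner_loop_eq (l : List Int) (res : List Int) (i : Int) (hi : 0 ≤ i) :
    (PySem.List.pyRange (i + 1) (l.length : Int) 1).foldl
      (fun res j => if PySem.List.pyGetD l i 0 == PySem.List.pyGetD l j 0 then
          res ++ [PySem.List.pyGetD l i 0] else res) res
    = res ++ List.replicate ((l.drop (i + 1).toNat).count (PySem.List.pyGetD l i 0))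
        (PySem.List.pyGetD l i 0) := by
  rw [PySem.List.foldl_pyRange_pyGetD' l 0
      (fun acc y => if PySem.List.pyGetD l i 0 == y then acc ++ [PySem.List.pyGetD l i 0] else acc)
      res (show (0:Int) ≤ i + 1 by omega)]
  rw [PySem.List.foldl_append_if (fun y => PySem.List.pyGetD l i 0 == y)
      (fun _ => PySem.List.pyGetD l i 0)]
  rw [filter_map_const_eq_replicate]

lemma dongmung_eq_flatMap (l : List Int) :
    dongmung l = List.flatMap
      (fun k => List.replicate ((l.drop (k + 1)).count (l.getD k 0)) (l.getD k 0))
      (List.range l.length) := by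
  unfold dongmung
  simp only [PySem.List.len_eq]
  rw [PySem.List.foldl_congr_mem _ _
      (fun res i => res ++ List.replicate ((l.drop (i + 1).toNat).count (PySem.List.pyGetD l i 0))
        (PySem.List.pyGetD l i 0)) _
      (fun res i hi => inner_loop_eq l res i ((PySem.List.mem_pyRange_one.mp hi).1))]
  rw [PySem.List.foldl_append_eq_flatMap, PySem.List.pyRange_zero_natCast, List.flatMap_map,
     List.nil_append]
  congr 1
  funext k
  have h2 : (((k : Int)) + 1).toNat = k + 1 := by omega
  simp [h2]

lemma flatMap_range_eq_pairRep (l : List Int) :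
    List.flatMap
      (fun k => List.replicate ((l.drop (k + 1)).count (l.getD k 0)) (l.getD k 0))
      (List.range l.length) = pairRep l := by
  induction l with
  | nil => simp [pairRep]
  | cons x xs ih =>
    rw [List.length_cons, List.range_succ_eq_map, List.flatMap_cons, List.flatMap_map, pairRep]
    simp only [Nat.succ_eq_add_one, List.drop_succ_cons, List.drop_zero, List.getD_cons_zero,
      List.getD_cons_succ]
    rw [ih]

-- ---- B = pairRep ----

/-- The state of B's right-to-left pass. -/
def stB (l : List Int) : PySem.Dict Int Int × List (List Int) :=
  l.reverse.foldl
    (fun st x =>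
      let c := st.1.getD x 0
      (st.1.insert x (c + 1), st.2 ++ [List.replicate c.toNat x]))
    (PySem.Dict.empty, [])

lemma stB_cons (x : Int) (xs : List Int) :
    stB (x :: xs) = ((stB xs).1.insert x ((stB xs).1.getD x 0 + 1),
      (stB xs).2 ++ [List.replicate ((stB xs).1.getD x 0).toNat x]) := by
  unfold stB
  rw [List.reverse_cons, List.foldl_append]
  rfl

lemma stB_getD (l : List Int) (v : Int) : (stB l).1.getD v 0 = (l.count v : Int) := by
  induction l with
  | nil => simp [stB, PySem.Dict.getD_empty]
  | cons x xs ih =>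
    rw [stB_cons]
    simp only [PySem.Dict.getD_insert]
    by_cases h : v = x
    · subst h
      simp [List.count_cons, ih]
    · simp [List.count_cons, h, Ne.symm h, ih]

lemma stB_pieces (l : List Int) : (stB l).2.reverse.flatten = pairRep l := by
  induction l with
  | nil => simp [stB, pairRep]
  | cons x xs ih =>
    rw [stB_cons, pairRep]
    simp [List.reverse_append, stB_getD, ih]

lemma dongmung_alt_eq_pairRep (l : List Int) : dongmung_alt l = pairRep l := by
  have h : dongmung_alt l = (stB l).2.reverse.flatten := by
    unfold dongmung_alt stB
    simp only [PySem.List.foldl_append_eq_flatten, List.nil_append]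
  rw [h, stB_pieces]

-- ===== VERDICT (by name: the statement is the Claim_ definition above) =====
theorem dongmung_spec : Claim_equal_dongmung := by
  intro l _
  unfold Spec_dongmung
  rw [dongmung_eq_flatMap, flatMap_range_eq_pairRep, dongmung_alt_eq_pairRep]
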